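-- pv_equiv track=rewrite | github.com/jeffreydebolt/cfo-forecast-refactored | integrated_forecast_display.py | apply_mappings_to_transactions
-- ===== SOURCE A (Python) =====
-- def apply_mappings_to_transactions(transactions, mappings):
--     """Apply vendor mappings to transaction records"""
--     # Create reverse mapping
--     vendor_to_group = {}
--     for group_name, vendors in mappings.items():
--         for vendor in vendors:
--             vendor_to_group[vendor] = group_name
--
--     # Update transaction vendor names
--     for txn in transactions:
--         original_vendor = txn.get('vendor_name', '')
--         txn['display_name'] = vendor_to_group.get(original_vendor, original_vendor)
--
--     return transactions
-- ===== SOURCE B (Python) =====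
-- def apply_mappings_to_transactions(transactions, mappings):
--     """Apply vendor mappings to transaction records"""
--     for txn in transactions:
--         original_vendor = txn.get('vendor_name', '')
--         display = original_vendor
--         for group_name, vendors in mappings.items():
--             if original_vendor in vendors:
--                 display = group_name
--         txn['display_name'] = display
--     return transactions
-- ===== Notes on version B (the rewrite author's own statement) =====
-- stated objective: simpler
-- what changed: Drops the reverse vendor->group dictionary entirely: for each transaction B scans the mappings directly, keeping the last group whose vendor list contains the vendor (matching A's dict-overwrite last-wins semantics) and defaulting to the vendor itself.
import Mathlib
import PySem

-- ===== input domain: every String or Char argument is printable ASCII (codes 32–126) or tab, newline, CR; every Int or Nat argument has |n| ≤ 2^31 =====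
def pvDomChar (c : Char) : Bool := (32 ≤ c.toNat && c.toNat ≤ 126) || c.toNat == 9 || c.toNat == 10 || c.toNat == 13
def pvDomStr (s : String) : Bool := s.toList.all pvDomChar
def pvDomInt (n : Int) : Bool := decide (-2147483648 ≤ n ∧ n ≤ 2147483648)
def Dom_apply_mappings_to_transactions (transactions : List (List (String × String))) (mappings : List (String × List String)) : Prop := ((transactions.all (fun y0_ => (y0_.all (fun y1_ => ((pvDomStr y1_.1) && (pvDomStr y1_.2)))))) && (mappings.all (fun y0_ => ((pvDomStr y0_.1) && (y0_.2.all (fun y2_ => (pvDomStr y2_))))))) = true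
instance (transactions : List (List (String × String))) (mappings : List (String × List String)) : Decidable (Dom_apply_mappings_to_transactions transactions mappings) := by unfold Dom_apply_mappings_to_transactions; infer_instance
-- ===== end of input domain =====

-- B drops A's reverse vendor->group dictionary and scans the mappings per transaction
-- (last matching group wins), for a simpler single-pass decomposition; equivalence is
-- about the return value (the Python versions mutate the transaction dicts identically).


-- ===== PORT A =====
-- vendor_to_group = {}; for group_name, vendors in mappings.items(): for vendor in vendors: vendor_to_group[vendor] = group_name
def pvVendorToGroup (mappings : List (String × List String)) : PySem.Dict String String :=
  mappings.foldl (fun d p => p.2.foldl (fun d vendor => d.insert vendor p.1) d) PySem.Dict.empty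

def apply_mappings_to_transactions (transactions : List (List (String × String))) (mappings : List (String × List String)) : List (List (String × String)) :=
  let vendor_to_group := pvVendorToGroup mappings
  -- for txn in transactions: txn['display_name'] = vendor_to_group.get(txn.get('vendor_name',''), …)
  transactions.map (fun txn =>
    let t := PySem.Dict.mk txn
    let original_vendor := t.getD "vendor_name" ""
    (t.insert "display_name" (vendor_to_group.getD original_vendor original_vendor)).items)

-- ===== PORT B =====
def apply_mappings_to_transactions_alt (transactions : List (List (String × String))) (mappings : List (String × List String)) : List (List (String × String)) :=
  transactions.map (fun txn =>
    let t := PySem.Dict.mk txn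
    let original_vendor := t.getD "vendor_name" ""
    let display := mappings.foldl (fun acc p => if original_vendor ∈ p.2 then p.1 else acc) original_vendor
    (t.insert "display_name" display).items)

-- ===== PRECONDITION & SPEC =====
def Spec_apply_mappings_to_transactions (transactions : List (List (String × String))) (mappings : List (String × List String)) (out : List (List (String × String))) : Prop := out = apply_mappings_to_transactions_alt transactions mappings
instance (transactions : List (List (String × String))) (mappings : List (String × List String)) (out : List (List (String × String))) : Decidable (Spec_apply_mappings_to_transactions transactions mappings out) := by unfold Spec_apply_mappings_to_transactions; infer_instance

-- ===== CLAIM (what is proved, stated in full; the proofs are below) =====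
def Claim_equal_apply_mappings_to_transactions : Prop := ∀ (transactions : List (List (String × String))) (mappings : List (String × List String)), Dom_apply_mappings_to_transactions transactions mappings → Spec_apply_mappings_to_transactions transactions mappings (apply_mappings_to_transactions transactions mappings)

-- ===== LEMMAS AND PROOFS =====

-- inner loop of A's dict build: inserting every vendor of one group with value g
theorem getD_insert_group (vs : List String) (g : String) (d : PySem.Dict String String)
    (v dflt : String) :
    (vs.foldl (fun d w => d.insert w g) d).getD v dflt
      = if v ∈ vs then g else d.getD v dflt := by
  induction vs generalizing d with
  | nil => simp
  | cons w ws ih =>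
      simp only [List.foldl_cons, ih, PySem.Dict.getD_insert, List.mem_cons]
      by_cases h1 : v ∈ ws <;> by_cases h2 : v = w <;> simp [h1, h2]

-- A's whole dict build read back at v equals B's last-match scan
theorem getD_build (ms : List (String × List String)) (d : PySem.Dict String String)
    (v dflt : String) :
    (ms.foldl (fun d p => p.2.foldl (fun d w => d.insert w p.1) d) d).getD v dflt
      = ms.foldl (fun acc p => if v ∈ p.2 then p.1 else acc) (d.getD v dflt) := by
  induction ms generalizing d with
  | nil => rfl
  | cons m ms ih =>
      simp only [List.foldl_cons, ih, getD_insert_group]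

-- ===== VERDICT (by name: the statement is the Claim_ definition above) =====
theorem apply_mappings_to_transactions_spec : Claim_equal_apply_mappings_to_transactions := by
  intro transactions mappings _
  unfold Spec_apply_mappings_to_transactions apply_mappings_to_transactions
    apply_mappings_to_transactions_alt pvVendorToGroup
  refine List.map_congr_left (fun txn _ => ?_)
  simp only [getD_build, PySem.Dict.getD_empty]
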